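-- pv_equiv track=rewrite | github.com/miliar/Code_Jam_Webscraper | Solutions_in_python/Problem_212/fresh_cokolate.py | _solve
-- ===== SOURCE A (Python) =====
-- from collections import Counter
--
-- def _solve(p, groups):
--     all_patterns = {
--         2: [[0], [1, 1]],
--         3: [[0], [1, 2], [1, 1, 1], [2, 2, 2]],
--         4: [[0], [1, 3], [2, 2], [1, 1, 2], [3, 3, 2], [1, 1, 1, 1], [3, 3, 3, 3]]
--     }
--     cnts = [0] * p
--     for g in groups:
--         cnts[g % p] += 1
--     patterns = list(map(Counter, all_patterns[p]))
--     res = 0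
--     while True:
--         found = False
--         for pattern in patterns:
--             if all(cnts[key] >= pattern[key] for key in pattern):
--                 for key in pattern:
--                     cnts[key] -= pattern[key]
--                 found = True
--                 res += 1
--                 break
--         if not found:
--             break
--     if sum(cnts) > 0:
--         res += 1
--     return res
-- ===== SOURCE B (Python) =====
-- def _solve(p, groups):
--     cnts = [0] * p
--     for g in groups:
--         cnts[g % p] += 1
--     if p == 2:
--         return cnts[0] + cnts[1] // 2 + cnts[1] % 2
--     if p == 3:
--         lo, hi = (cnts[1], cnts[2]) if cnts[1] <= cnts[2] else (cnts[2], cnts[1])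
--         d = hi - lo
--         return cnts[0] + lo + d // 3 + (1 if d % 3 else 0)
--     # p == 4
--     lo, hi = (cnts[1], cnts[3]) if cnts[1] <= cnts[3] else (cnts[3], cnts[1])
--     d = hi - lo
--     res = cnts[0] + lo + cnts[2] // 2
--     if cnts[2] % 2 == 1 and d >= 2:
--         res += 1
--         d -= 2
--         return res + d // 4 + (1 if d % 4 else 0)
--     return res + d // 4 + (1 if d % 4 or cnts[2] % 2 else 0)
-- ===== Notes on version B (the rewrite author's own statement) =====
-- stated objective: simpler
-- what changed: Replaces the while-loop that repeatedly matches and subtracts Counter patterns with a single closed-form arithmetic formula on the remainder counts (pair the complementary remainders, divide out the triples/quadruples, add one for any leftover).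
-- outside the precondition, e.g. on _solve(5, [1, 2, 3]): A raises KeyError, B returns 2
import Mathlib
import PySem

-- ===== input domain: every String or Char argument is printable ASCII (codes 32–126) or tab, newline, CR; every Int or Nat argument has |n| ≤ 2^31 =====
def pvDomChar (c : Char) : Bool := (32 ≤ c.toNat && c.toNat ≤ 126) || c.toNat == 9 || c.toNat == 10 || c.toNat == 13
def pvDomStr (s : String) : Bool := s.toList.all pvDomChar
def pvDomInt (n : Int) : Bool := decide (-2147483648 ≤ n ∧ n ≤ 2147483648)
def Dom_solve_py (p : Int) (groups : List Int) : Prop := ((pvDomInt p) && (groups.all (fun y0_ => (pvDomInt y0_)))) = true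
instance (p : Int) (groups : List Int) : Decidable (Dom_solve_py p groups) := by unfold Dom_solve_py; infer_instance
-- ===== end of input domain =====

-- B replaces A's while-loop greedy pattern matching with direct closed-form arithmetic on the remainder counts (objective: simpler).

-- ===== PORT A =====
-- cnts = [0]*p; for g in groups: cnts[g % p] += 1   (shared by both Pythons word for word)
def buildCnts (p : Int) (groups : List Int) : List Int :=
  groups.foldl
    (fun c g => c.set (PySem.Int.mod g p).toNat (c.getD (PySem.Int.mod g p).toNat 0 + 1))
    (List.replicate p.toNat 0)

-- a Counter pattern as an association list (key, multiplicity), in Counter insertion order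
def patternsFor (p : Int) : List (List (Int × Int)) :=
  if p = 2 then [[(0, 1)], [(1, 2)]]
  else if p = 3 then [[(0, 1)], [(1, 1), (2, 1)], [(1, 3)], [(2, 3)]]
  else [[(0, 1)], [(1, 1), (3, 1)], [(2, 2)], [(1, 2), (2, 1)], [(3, 2), (2, 1)], [(1, 4)], [(3, 4)]]

-- all(cnts[key] >= pattern[key] for key in pattern)
def canApply (cnts : List Int) (pat : List (Int × Int)) : Bool :=
  pat.all (fun kv => decide (kv.2 ≤ cnts.getD kv.1.toNat 0))

-- for key in pattern: cnts[key] -= pattern[key]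
def applyPat (cnts : List Int) (pat : List (Int × Int)) : List Int :=
  pat.foldl (fun c kv => c.set kv.1.toNat (c.getD kv.1.toNat 0 - kv.2)) cnts

-- the inner for-loop over patterns: first applicable pattern applied, else none (found = False)
def firstApplicable (cnts : List Int) : List (List (Int × Int)) → Option (List Int)
  | [] => none
  | pat :: rest => if canApply cnts pat then some (applyPat cnts pat) else firstApplicable cnts rest

-- sum(cnts)
def sumI (cnts : List Int) : Int := cnts.foldl (· + ·) 0

-- the while True loop; fuel groups.length + 1 never runs out because every applied
-- pattern removes at least one counted group
def loopA (pats : List (List (Int × Int))) : Nat → List Int → Int → List Int × Int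
  | 0, cnts, res => (cnts, res)
  | fuel + 1, cnts, res =>
    match firstApplicable cnts pats with
    | none => (cnts, res)
    | some c' => loopA pats fuel c' (res + 1)

def solve_py (p : Int) (groups : List Int) : Int :=
  let cnts := buildCnts p groups
  let r := loopA (patternsFor p) (groups.length + 1) cnts 0
  if 0 < sumI r.1 then r.2 + 1 else r.2

-- ===== PORT B =====
-- closed form for p = 3 on the counts (c0, c1, c2)
def altP3 (c0 c1 c2 : Int) : Int :=
  let lohi := if c1 ≤ c2 then (c1, c2) else (c2, c1)
  let d := lohi.2 - lohi.1
  c0 + lohi.1 + PySem.Int.floordiv d 3 + (if PySem.Int.mod d 3 ≠ 0 then 1 else 0)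

-- closed form for p = 4 on the counts (c0, c1, c2, c3)
def altP4 (c0 c1 c2 c3 : Int) : Int :=
  let lohi := if c1 ≤ c3 then (c1, c3) else (c3, c1)
  let d := lohi.2 - lohi.1
  let res := c0 + lohi.1 + PySem.Int.floordiv c2 2
  if PySem.Int.mod c2 2 = 1 ∧ 2 ≤ d then
    res + 1 + PySem.Int.floordiv (d - 2) 4 + (if PySem.Int.mod (d - 2) 4 ≠ 0 then 1 else 0)
  else
    res + PySem.Int.floordiv d 4 +
      (if PySem.Int.mod d 4 ≠ 0 ∨ PySem.Int.mod c2 2 ≠ 0 then 1 else 0)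

def solve_py_alt (p : Int) (groups : List Int) : Int :=
  let cnts := buildCnts p groups
  if p = 2 then
    cnts.getD 0 0 + PySem.Int.floordiv (cnts.getD 1 0) 2 + PySem.Int.mod (cnts.getD 1 0) 2
  else if p = 3 then altP3 (cnts.getD 0 0) (cnts.getD 1 0) (cnts.getD 2 0)
  else altP4 (cnts.getD 0 0) (cnts.getD 1 0) (cnts.getD 2 0) (cnts.getD 3 0)

-- ===== PRECONDITION & SPEC =====
-- A's pattern table only has entries for p = 2, 3, 4; any other p raises (KeyError,
-- ZeroDivisionError or IndexError), so exactly those inputs are excluded.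
def Pre_solve_py (p : Int) (groups : List Int) : Prop := p = 2 ∨ p = 3 ∨ p = 4
instance (p : Int) (groups : List Int) : Decidable (Pre_solve_py p groups) := by
  unfold Pre_solve_py; infer_instance
def pvWitness_solve_py : Int × List Int := (4, [1, 2, 3, 5, 8])

def Spec_solve_py (p : Int) (groups : List Int) (out : Int) : Prop := out = solve_py_alt p groups
instance (p : Int) (groups : List Int) (out : Int) : Decidable (Spec_solve_py p groups out) := by
  unfold Spec_solve_py; infer_instance

-- ===== CLAIM (what is proved, stated in full; the proofs are below) =====
def Claim_equal_solve_py : Prop := ∀ (p : Int) (groups : List Int), Dom_solve_py p groups → Pre_solve_py p groups → Spec_solve_py p groups (solve_py p groups)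

-- ===== LEMMAS AND PROOFS =====

-- number of groups with remainder i mod p
def cnt (p i : Int) (gs : List Int) : Nat := gs.countP (fun g => decide (PySem.Int.mod g p = i))

lemma cnt_nil (p i : Int) : cnt p i [] = 0 := rfl

lemma cnt_cons (p i g : Int) (gs : List Int) :
    cnt p i (g :: gs) = cnt p i gs + (if PySem.Int.mod g p = i then 1 else 0) := by
  simp only [cnt, List.countP_cons, decide_eq_true_eq]

lemma loopA_succ_none (pats : List (List (Int × Int))) (n : Nat) (cnts : List Int) (res : Int)
    (h : firstApplicable cnts pats = none) : loopA pats (n + 1) cnts res = (cnts, res) := by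
  simp [loopA, h]

lemma loopA_succ_some (pats : List (List (Int × Int))) (n : Nat) (cnts c' : List Int) (res : Int)
    (h : firstApplicable cnts pats = some c') :
    loopA pats (n + 1) cnts res = loopA pats n c' (res + 1) := by
  simp [loopA, h]

lemma build2 (gs : List Int) (a b : Int) :
    gs.foldl (fun c g => c.set (PySem.Int.mod g 2).toNat (c.getD (PySem.Int.mod g 2).toNat 0 + 1)) [a, b]
      = [a + (cnt 2 0 gs : Int), b + (cnt 2 1 gs : Int)] := by
  induction gs generalizing a b with
  | nil => simp [cnt_nil]
  | cons g gs ih =>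
    have hm : PySem.Int.mod g 2 = g % 2 := PySem.Int.mod_eq_emod_of_pos (by norm_num)
    rw [List.foldl_cons]
    have h01 : g % 2 = 0 ∨ g % 2 = 1 := by omega
    rcases h01 with h | h
    · have hstep : ([a, b].set (PySem.Int.mod g 2).toNat (([a, b].getD (PySem.Int.mod g 2).toNat 0) + 1)) = [a + 1, b] := by rw [hm, h]; rfl
      rw [hstep, ih, cnt_cons 2 0, cnt_cons 2 1, hm, h]
      simp only [List.cons.injEq, and_true]
      push_cast
      norm_num
      omega
    · have hstep : ([a, b].set (PySem.Int.mod g 2).toNat (([a, b].getD (PySem.Int.mod g 2).toNat 0) + 1)) = [a, b + 1] := by rw [hm, h]; rfl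
      rw [hstep, ih, cnt_cons 2 0, cnt_cons 2 1, hm, h]
      simp only [List.cons.injEq, and_true]
      push_cast
      norm_num
      omega

lemma build3 (gs : List Int) (a b c : Int) :
    gs.foldl (fun cc g => cc.set (PySem.Int.mod g 3).toNat (cc.getD (PySem.Int.mod g 3).toNat 0 + 1)) [a, b, c]
      = [a + (cnt 3 0 gs : Int), b + (cnt 3 1 gs : Int), c + (cnt 3 2 gs : Int)] := by
  induction gs generalizing a b c with
  | nil => simp [cnt_nil]
  | cons g gs ih =>
    have hm : PySem.Int.mod g 3 = g % 3 := PySem.Int.mod_eq_emod_of_pos (by norm_num)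
    rw [List.foldl_cons]
    have h01 : g % 3 = 0 ∨ g % 3 = 1 ∨ g % 3 = 2 := by omega
    rcases h01 with h | h | h
    · have hstep : ([a, b, c].set (PySem.Int.mod g 3).toNat (([a, b, c].getD (PySem.Int.mod g 3).toNat 0) + 1)) = [a + 1, b, c] := by rw [hm, h]; rfl
      rw [hstep, ih, cnt_cons 3 0, cnt_cons 3 1, cnt_cons 3 2, hm, h]
      simp only [List.cons.injEq, and_true]
      push_cast
      norm_num
      omega
    · have hstep : ([a, b, c].set (PySem.Int.mod g 3).toNat (([a, b, c].getD (PySem.Int.mod g 3).toNat 0) + 1)) = [a, b + 1, c] := by rw [hm, h]; rfl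
      rw [hstep, ih, cnt_cons 3 0, cnt_cons 3 1, cnt_cons 3 2, hm, h]
      simp only [List.cons.injEq, and_true]
      push_cast
      norm_num
      omega
    · have hstep : ([a, b, c].set (PySem.Int.mod g 3).toNat (([a, b, c].getD (PySem.Int.mod g 3).toNat 0) + 1)) = [a, b, c + 1] := by rw [hm, h]; rfl
      rw [hstep, ih, cnt_cons 3 0, cnt_cons 3 1, cnt_cons 3 2, hm, h]
      simp only [List.cons.injEq, and_true]
      push_cast
      norm_num
      omega

lemma build4 (gs : List Int) (a b c d : Int) :
    gs.foldl (fun cc g => cc.set (PySem.Int.mod g 4).toNat (cc.getD (PySem.Int.mod g 4).toNat 0 + 1)) [a, b, c, d]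
      = [a + (cnt 4 0 gs : Int), b + (cnt 4 1 gs : Int), c + (cnt 4 2 gs : Int), d + (cnt 4 3 gs : Int)] := by
  induction gs generalizing a b c d with
  | nil => simp [cnt_nil]
  | cons g gs ih =>
    have hm : PySem.Int.mod g 4 = g % 4 := PySem.Int.mod_eq_emod_of_pos (by norm_num)
    rw [List.foldl_cons]
    have h01 : g % 4 = 0 ∨ g % 4 = 1 ∨ g % 4 = 2 ∨ g % 4 = 3 := by omega
    rcases h01 with h | h | h | h
    · have hstep : ([a, b, c, d].set (PySem.Int.mod g 4).toNat (([a, b, c, d].getD (PySem.Int.mod g 4).toNat 0) + 1)) = [a + 1, b, c, d] := by rw [hm, h]; rfl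
      rw [hstep, ih, cnt_cons 4 0, cnt_cons 4 1, cnt_cons 4 2, cnt_cons 4 3, hm, h]
      simp only [List.cons.injEq, and_true]
      push_cast
      norm_num
      omega
    · have hstep : ([a, b, c, d].set (PySem.Int.mod g 4).toNat (([a, b, c, d].getD (PySem.Int.mod g 4).toNat 0) + 1)) = [a, b + 1, c, d] := by rw [hm, h]; rfl
      rw [hstep, ih, cnt_cons 4 0, cnt_cons 4 1, cnt_cons 4 2, cnt_cons 4 3, hm, h]
      simp only [List.cons.injEq, and_true]
      push_cast
      norm_num
      omega
    · have hstep : ([a, b, c, d].set (PySem.Int.mod g 4).toNat (([a, b, c, d].getD (PySem.Int.mod g 4).toNat 0) + 1)) = [a, b, c + 1, d] := by rw [hm, h]; rfl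
      rw [hstep, ih, cnt_cons 4 0, cnt_cons 4 1, cnt_cons 4 2, cnt_cons 4 3, hm, h]
      simp only [List.cons.injEq, and_true]
      push_cast
      norm_num
      omega
    · have hstep : ([a, b, c, d].set (PySem.Int.mod g 4).toNat (([a, b, c, d].getD (PySem.Int.mod g 4).toNat 0) + 1)) = [a, b, c, d + 1] := by rw [hm, h]; rfl
      rw [hstep, ih, cnt_cons 4 0, cnt_cons 4 1, cnt_cons 4 2, cnt_cons 4 3, hm, h]
      simp only [List.cons.injEq, and_true]
      push_cast
      norm_num
      omega

lemma cnt2_len (gs : List Int) : cnt 2 0 gs + cnt 2 1 gs = gs.length := by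
  induction gs with
  | nil => simp [cnt_nil]
  | cons g gs ih =>
    have hm : PySem.Int.mod g 2 = g % 2 := PySem.Int.mod_eq_emod_of_pos (by norm_num)
    have h01 : g % 2 = 0 ∨ g % 2 = 1 := by omega
    rw [cnt_cons 2 0, cnt_cons 2 1, hm, List.length_cons]
    rcases h01 with h | h <;> rw [h] <;> norm_num <;> omega

lemma cnt3_len (gs : List Int) : cnt 3 0 gs + cnt 3 1 gs + cnt 3 2 gs = gs.length := by
  induction gs with
  | nil => simp [cnt_nil]
  | cons g gs ih =>
    have hm : PySem.Int.mod g 3 = g % 3 := PySem.Int.mod_eq_emod_of_pos (by norm_num)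
    have h01 : g % 3 = 0 ∨ g % 3 = 1 ∨ g % 3 = 2 := by omega
    rw [cnt_cons 3 0, cnt_cons 3 1, cnt_cons 3 2, hm, List.length_cons]
    rcases h01 with h | h | h <;> rw [h] <;> norm_num <;> omega

lemma cnt4_len (gs : List Int) : cnt 4 0 gs + cnt 4 1 gs + cnt 4 2 gs + cnt 4 3 gs = gs.length := by
  induction gs with
  | nil => simp [cnt_nil]
  | cons g gs ih =>
    have hm : PySem.Int.mod g 4 = g % 4 := PySem.Int.mod_eq_emod_of_pos (by norm_num)
    have h01 : g % 4 = 0 ∨ g % 4 = 1 ∨ g % 4 = 2 ∨ g % 4 = 3 := by omega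
    rw [cnt_cons 4 0, cnt_cons 4 1, cnt_cons 4 2, cnt_cons 4 3, hm, List.length_cons]
    rcases h01 with h | h | h | h <;> rw [h] <;> norm_num <;> omega

lemma first2 (a b : Int) :
    firstApplicable [a, b] (patternsFor 2) =
      if 1 ≤ a then some [a - 1, b]
      else if 2 ≤ b then some [a, b - 2]
      else none := by
  simp [patternsFor, firstApplicable, canApply, applyPat]

lemma first3 (a b c : Int) :
    firstApplicable [a, b, c] (patternsFor 3) =
      if 1 ≤ a then some [a - 1, b, c]
      else if 1 ≤ b ∧ 1 ≤ c then some [a, b - 1, c - 1]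
      else if 3 ≤ b then some [a, b - 3, c]
      else if 3 ≤ c then some [a, b, c - 3]
      else none := by
  simp [patternsFor, firstApplicable, canApply, applyPat]

lemma first4 (a b c d : Int) :
    firstApplicable [a, b, c, d] (patternsFor 4) =
      if 1 ≤ a then some [a - 1, b, c, d]
      else if 1 ≤ b ∧ 1 ≤ d then some [a, b - 1, c, d - 1]
      else if 2 ≤ c then some [a, b, c - 2, d]
      else if 2 ≤ b ∧ 1 ≤ c then some [a, b - 2, c - 1, d]
      else if 2 ≤ d ∧ 1 ≤ c then some [a, b, c - 1, d - 2]
      else if 4 ≤ b then some [a, b - 4, c, d]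
      else if 4 ≤ d then some [a, b, c, d - 4]
      else none := by
  simp [patternsFor, firstApplicable, canApply, applyPat]

lemma alt3_eq (a b c : Int) : altP3 a b c =
    if b ≤ c then a + b + (c - b) / 3 + (if (c - b) % 3 ≠ 0 then 1 else 0)
    else a + c + (b - c) / 3 + (if (b - c) % 3 ≠ 0 then 1 else 0) := by
  simp only [altP3, PySem.Int.floordiv_eq_ediv_of_pos (by norm_num : (0:Int) < 3),
    PySem.Int.mod_eq_emod_of_pos (by norm_num : (0:Int) < 3)]
  split_ifs <;> simp_all

lemma alt4_eq (a b c d : Int) : altP4 a b c d =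
    if b ≤ d then
      (if c % 2 = 1 ∧ 2 ≤ d - b then
        a + b + c / 2 + 1 + (d - b - 2) / 4 + (if (d - b - 2) % 4 ≠ 0 then 1 else 0)
      else
        a + b + c / 2 + (d - b) / 4 + (if (d - b) % 4 ≠ 0 ∨ c % 2 ≠ 0 then 1 else 0))
    else
      (if c % 2 = 1 ∧ 2 ≤ b - d then
        a + d + c / 2 + 1 + (b - d - 2) / 4 + (if (b - d - 2) % 4 ≠ 0 then 1 else 0)
      else
        a + d + c / 2 + (b - d) / 4 + (if (b - d) % 4 ≠ 0 ∨ c % 2 ≠ 0 then 1 else 0)) := by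
  simp only [altP4, PySem.Int.floordiv_eq_ediv_of_pos (by norm_num : (0:Int) < 4),
    PySem.Int.floordiv_eq_ediv_of_pos (by norm_num : (0:Int) < 2),
    PySem.Int.mod_eq_emod_of_pos (by norm_num : (0:Int) < 2),
    PySem.Int.mod_eq_emod_of_pos (by norm_num : (0:Int) < 4)]
  split_ifs <;> simp_all

lemma loop2 (n : Nat) : ∀ (a b res : Int), 0 ≤ a → 0 ≤ b → (a + b).toNat < n →
    (if 0 < sumI (loopA (patternsFor 2) n [a, b] res).1
      then (loopA (patternsFor 2) n [a, b] res).2 + 1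
      else (loopA (patternsFor 2) n [a, b] res).2)
    = res + (a + PySem.Int.floordiv b 2 + PySem.Int.mod b 2) := by
  induction n with
  | zero => intro a b res ha hb hn; exact absurd hn (by omega)
  | succ n ih =>
    intro a b res ha hb hn
    have h2 : PySem.Int.floordiv b 2 = b / 2 := PySem.Int.floordiv_eq_ediv_of_pos (by norm_num)
    have h2' : PySem.Int.mod b 2 = b % 2 := PySem.Int.mod_eq_emod_of_pos (by norm_num)
    by_cases h1 : 1 ≤ a
    · have hfa : firstApplicable [a, b] (patternsFor 2) = some [a - 1, b] := by
        rw [first2]; split_ifs <;> first | rfl | (exfalso; omega)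
      rw [loopA_succ_some _ _ _ _ _ hfa, ih (a - 1) b (res + 1) (by omega) hb (by omega),
        h2, h2']
      omega
    · by_cases hb2 : 2 ≤ b
      · have hfa : firstApplicable [a, b] (patternsFor 2) = some [a, b - 2] := by
          rw [first2]; split_ifs <;> first | rfl | (exfalso; omega)
        rw [loopA_succ_some _ _ _ _ _ hfa, ih a (b - 2) (res + 1) ha (by omega) (by omega),
          PySem.Int.floordiv_eq_ediv_of_pos (by norm_num : (0:Int) < 2),
          PySem.Int.mod_eq_emod_of_pos (by norm_num : (0:Int) < 2), h2, h2']
        omega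
      · have hfa : firstApplicable [a, b] (patternsFor 2) = none := by
          rw [first2]; split_ifs <;> first | rfl | (exfalso; omega)
        rw [loopA_succ_none _ _ _ _ hfa]
        simp only [sumI, List.foldl, h2, h2']
        split_ifs <;> omega

set_option maxHeartbeats 1000000 in
lemma loop3 (n : Nat) : ∀ (a b c res : Int), 0 ≤ a → 0 ≤ b → 0 ≤ c → (a + b + c).toNat < n →
    (if 0 < sumI (loopA (patternsFor 3) n [a, b, c] res).1
      then (loopA (patternsFor 3) n [a, b, c] res).2 + 1
      else (loopA (patternsFor 3) n [a, b, c] res).2)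
    = res + altP3 a b c := by
  induction n with
  | zero => intro a b c res ha hb hc hn; exact absurd hn (by omega)
  | succ n ih =>
    intro a b c res ha hb hc hn
    by_cases h1 : 1 ≤ a
    · have hfa : firstApplicable [a, b, c] (patternsFor 3) = some [a - 1, b, c] := by
        rw [first3]; split_ifs <;> first | rfl | (exfalso; omega)
      rw [loopA_succ_some _ _ _ _ _ hfa, ih (a - 1) b c (res + 1) (by omega) hb hc (by omega),
        alt3_eq, alt3_eq]
      split_ifs <;> omega
    · by_cases h2 : 1 ≤ b ∧ 1 ≤ c
      · have hfa : firstApplicable [a, b, c] (patternsFor 3) = some [a, b - 1, c - 1] := by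
          rw [first3]; split_ifs <;> first | rfl | (exfalso; omega)
        rw [loopA_succ_some _ _ _ _ _ hfa,
          ih a (b - 1) (c - 1) (res + 1) ha (by omega) (by omega) (by omega), alt3_eq, alt3_eq]
        split_ifs <;> omega
      · by_cases h3 : 3 ≤ b
        · have hfa : firstApplicable [a, b, c] (patternsFor 3) = some [a, b - 3, c] := by
            rw [first3]; split_ifs <;> first | rfl | (exfalso; omega)
          rw [loopA_succ_some _ _ _ _ _ hfa,
            ih a (b - 3) c (res + 1) ha (by omega) hc (by omega), alt3_eq, alt3_eq]
          split_ifs <;> omega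
        · by_cases h4 : 3 ≤ c
          · have hfa : firstApplicable [a, b, c] (patternsFor 3) = some [a, b, c - 3] := by
              rw [first3]; split_ifs <;> first | rfl | (exfalso; omega)
            rw [loopA_succ_some _ _ _ _ _ hfa,
              ih a b (c - 3) (res + 1) ha hb (by omega) (by omega), alt3_eq, alt3_eq]
            split_ifs <;> omega
          · have hfa : firstApplicable [a, b, c] (patternsFor 3) = none := by
              rw [first3]; split_ifs <;> first | rfl | (exfalso; omega)
            rw [loopA_succ_none _ _ _ _ hfa]
            simp only [sumI, List.foldl]
            rw [alt3_eq]
            split_ifs <;> omega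

set_option maxHeartbeats 1000000 in
lemma loop4 (n : Nat) : ∀ (a b c d res : Int), 0 ≤ a → 0 ≤ b → 0 ≤ c → 0 ≤ d →
    (a + b + c + d).toNat < n →
    (if 0 < sumI (loopA (patternsFor 4) n [a, b, c, d] res).1
      then (loopA (patternsFor 4) n [a, b, c, d] res).2 + 1
      else (loopA (patternsFor 4) n [a, b, c, d] res).2)
    = res + altP4 a b c d := by
  induction n with
  | zero => intro a b c d res ha hb hc hd hn; exact absurd hn (by omega)
  | succ n ih =>
    intro a b c d res ha hb hc hd hn
    by_cases h1 : 1 ≤ a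
    · have hfa : firstApplicable [a, b, c, d] (patternsFor 4) = some [a - 1, b, c, d] := by
        rw [first4]; split_ifs <;> first | rfl | (exfalso; omega)
      rw [loopA_succ_some _ _ _ _ _ hfa,
        ih (a - 1) b c d (res + 1) (by omega) hb hc hd (by omega), alt4_eq, alt4_eq]
      split_ifs <;> omega
    · by_cases h2 : 1 ≤ b ∧ 1 ≤ d
      · have hfa : firstApplicable [a, b, c, d] (patternsFor 4) = some [a, b - 1, c, d - 1] := by
          rw [first4]; split_ifs <;> first | rfl | (exfalso; omega)
        rw [loopA_succ_some _ _ _ _ _ hfa,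
          ih a (b - 1) c (d - 1) (res + 1) ha (by omega) hc (by omega) (by omega),
          alt4_eq, alt4_eq]
        split_ifs <;> omega
      · by_cases h3 : 2 ≤ c
        · have hfa : firstApplicable [a, b, c, d] (patternsFor 4) = some [a, b, c - 2, d] := by
            rw [first4]; split_ifs <;> first | rfl | (exfalso; omega)
          rw [loopA_succ_some _ _ _ _ _ hfa,
            ih a b (c - 2) d (res + 1) ha hb (by omega) hd (by omega), alt4_eq, alt4_eq]
          split_ifs <;> omega
        · by_cases h4 : 2 ≤ b ∧ 1 ≤ c
          · have hfa : firstApplicable [a, b, c, d] (patternsFor 4) = some [a, b - 2, c - 1, d] := by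
              rw [first4]; split_ifs <;> first | rfl | (exfalso; omega)
            rw [loopA_succ_some _ _ _ _ _ hfa,
              ih a (b - 2) (c - 1) d (res + 1) ha (by omega) (by omega) hd (by omega),
              alt4_eq, alt4_eq]
            split_ifs <;> omega
          · by_cases h5 : 2 ≤ d ∧ 1 ≤ c
            · have hfa : firstApplicable [a, b, c, d] (patternsFor 4) = some [a, b, c - 1, d - 2] := by
                rw [first4]; split_ifs <;> first | rfl | (exfalso; omega)
              rw [loopA_succ_some _ _ _ _ _ hfa,
                ih a b (c - 1) (d - 2) (res + 1) ha hb (by omega) (by omega) (by omega),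
                alt4_eq, alt4_eq]
              split_ifs <;> omega
            · by_cases h6 : 4 ≤ b
              · have hfa : firstApplicable [a, b, c, d] (patternsFor 4) = some [a, b - 4, c, d] := by
                  rw [first4]; split_ifs <;> first | rfl | (exfalso; omega)
                rw [loopA_succ_some _ _ _ _ _ hfa,
                  ih a (b - 4) c d (res + 1) ha (by omega) hc hd (by omega), alt4_eq, alt4_eq]
                split_ifs <;> omega
              · by_cases h7 : 4 ≤ d
                · have hfa : firstApplicable [a, b, c, d] (patternsFor 4) = some [a, b, c, d - 4] := by
                    rw [first4]; split_ifs <;> first | rfl | (exfalso; omega)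
                  rw [loopA_succ_some _ _ _ _ _ hfa,
                    ih a b c (d - 4) (res + 1) ha hb hc (by omega) (by omega), alt4_eq, alt4_eq]
                  split_ifs <;> omega
                · have hfa : firstApplicable [a, b, c, d] (patternsFor 4) = none := by
                    rw [first4]; split_ifs <;> first | rfl | (exfalso; omega)
                  rw [loopA_succ_none _ _ _ _ hfa]
                  simp only [sumI, List.foldl]
                  rw [alt4_eq]
                  split_ifs <;> omega

-- ===== VERDICT (by name: the statement is the Claim_ definition above) =====
theorem solve_py_spec : Claim_equal_solve_py := by
  intro p groups hdom hpre
  unfold Spec_solve_py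
  rcases hpre with rfl | rfl | rfl
  · -- p = 2
    have hrep : List.replicate (2:Int).toNat (0:Int) = [0, 0] := rfl
    simp only [solve_py, solve_py_alt, buildCnts, hrep, build2]
    norm_num
    rw [loop2 (groups.length + 1) _ _ 0 (by positivity) (by positivity)
      (by have := cnt2_len groups; omega)]
    simp only [PySem.Int.floordiv_eq_ediv_of_pos (b := 2) (by norm_num),
      PySem.Int.mod_eq_emod_of_pos (b := 2) (by norm_num)]
    omega
  · -- p = 3
    have hrep : List.replicate (3:Int).toNat (0:Int) = [0, 0, 0] := rfl
    simp only [solve_py, solve_py_alt, buildCnts, hrep, build3]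
    norm_num
    rw [loop3 (groups.length + 1) _ _ _ 0 (by positivity) (by positivity) (by positivity)
      (by have := cnt3_len groups; omega)]
    rw [zero_add]
  · -- p = 4
    have hrep : List.replicate (4:Int).toNat (0:Int) = [0, 0, 0, 0] := rfl
    simp only [solve_py, solve_py_alt, buildCnts, hrep, build4]
    norm_num
    rw [loop4 (groups.length + 1) _ _ _ _ 0 (by positivity) (by positivity) (by positivity)
      (by positivity) (by have := cnt4_len groups; omega)]
    rw [zero_add]
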